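-- pv_equiv track=rewrite | github.com/facebookresearch/DST-EGQA | src/egqa/data_utils/dataloader.py | partial_belief_states_to_ordered_full_belief_states
-- ===== SOURCE A (Python) =====
-- from typing import Any, Dict, List, Set, Tuple, Union
--
-- def partial_belief_states_to_ordered_full_belief_states(
--     partial_belief_states: List[List[str]], ordered_slots: List[str]
-- ) -> List[List[str]]:
--     """
--
--     Args:
--         partial_belief_states (List[List[str]]): _description_ e.g [['restaurant-food', 'portugese']]
--
--     Returns:
--         List[List[str]]: same list but with 'none' slots filled in for empty slots among `ordered_slots` e.g. [['restaurant-area', 'none'], ['restaurant-day', 'none'], ['restaurant-food', 'portugese'], ['restaurant-name', 'none'], ['restaurant-people', 'none'], ['restaurant-pricerange', 'none'], ['restaurant-time', 'none']]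
--     """
--     partial_belief_states_dict = {bs[0]: bs[1] for bs in partial_belief_states}
--
--     return [
--         [slot, partial_belief_states_dict[slot]]
--         if slot in partial_belief_states_dict
--         else [slot, 'none']
--         for slot in ordered_slots
--     ]
-- ===== SOURCE B (Python) =====
-- def partial_belief_states_to_ordered_full_belief_states(partial_belief_states, ordered_slots):
--     # Start from an all-'none' template, then let each observed (slot, value) pair
--     # sweep over the template and overwrite its matching rows (later pairs win,
--     # like dict insertion).  No dictionary and no per-slot search.
--     result = [[slot, 'none'] for slot in ordered_slots]
--     for bs in partial_belief_states:
--         key, value = bs[0], bs[1]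
--         result = [[key, value] if row[0] == key else row for row in result]
--     return result
-- ===== Notes on version B (the rewrite author's own statement) =====
-- stated objective: alternative
-- what changed: Instead of building a dict and looking each slot up, B builds a full all-'none' template from ordered_slots first and then lets each observed pair sweep over the template and overwrite its matching rows in turn (later pairs win), inverting the loop structure: outer loop over the pairs, the template rewritten stage by stage.
import Mathlib
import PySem

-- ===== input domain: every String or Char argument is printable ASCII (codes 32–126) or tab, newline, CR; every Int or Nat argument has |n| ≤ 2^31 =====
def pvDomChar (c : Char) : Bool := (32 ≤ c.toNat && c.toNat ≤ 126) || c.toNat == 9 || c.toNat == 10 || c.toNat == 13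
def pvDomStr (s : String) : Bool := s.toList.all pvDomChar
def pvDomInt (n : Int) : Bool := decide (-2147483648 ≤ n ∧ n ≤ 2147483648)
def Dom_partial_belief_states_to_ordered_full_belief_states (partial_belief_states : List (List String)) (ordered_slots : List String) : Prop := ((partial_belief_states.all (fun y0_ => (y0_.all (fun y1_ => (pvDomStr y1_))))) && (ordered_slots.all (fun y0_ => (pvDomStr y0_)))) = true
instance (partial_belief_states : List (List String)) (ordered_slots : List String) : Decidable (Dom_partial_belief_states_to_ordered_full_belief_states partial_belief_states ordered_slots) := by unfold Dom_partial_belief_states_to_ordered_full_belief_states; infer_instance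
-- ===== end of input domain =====

-- B builds an all-'none' template from ordered_slots first and then lets each observed pair
-- overwrite its matching rows in turn (no dictionary); objective: alternative decomposition.

-- ===== PORT A =====
-- one step of the dict comprehension {bs[0]: bs[1] for bs in partial_belief_states};
-- the match on the entry is exact for entries of length ≥ 2 (Pre_; shorter raise IndexError)
def pvDictStep (d : PySem.Dict String String) (bs : List String) : PySem.Dict String String :=
  match bs with
  | k :: v :: _ => d.insert k v
  | _ => d

def partial_belief_states_to_ordered_full_belief_states (partial_belief_states : List (List String)) (ordered_slots : List String) : List (List String) :=
  let partial_belief_states_dict : PySem.Dict String String :=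
    partial_belief_states.foldl pvDictStep PySem.Dict.empty
  ordered_slots.map (fun slot =>
    if partial_belief_states_dict.contains slot then
      [slot, partial_belief_states_dict.getD slot ""]   -- lookup succeeds: contains holds
    else [slot, "none"])

-- ===== PORT B =====
-- the comprehension body '[key, value] if row[0] == key else row'; rows are built as
-- two-element lists, so matching on the head is exact (row[0] of reachable rows exists)
def pvPatch (key value : String) (row : List String) : List String :=
  match row with
  | s :: _ => if s == key then [key, value] else row
  | [] => row

-- one loop iteration: 'key, value = bs[0], bs[1]' then the rewrite of result;
-- exact for entries of length ≥ 2 (Pre_; shorter entries raise IndexError in Python)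
def pvSweep (result : List (List String)) (bs : List String) : List (List String) :=
  match bs with
  | k :: v :: _ => result.map (pvPatch k v)
  | _ => result

def partial_belief_states_to_ordered_full_belief_states_alt (partial_belief_states : List (List String)) (ordered_slots : List String) : List (List String) :=
  partial_belief_states.foldl pvSweep (ordered_slots.map (fun slot => [slot, "none"]))

-- ===== PRECONDITION & SPEC =====
-- Pre_ excludes inputs containing an entry with fewer than two elements, on which Python A
-- raises IndexError while evaluating the dict comprehension (B raises there too).
def Pre_partial_belief_states_to_ordered_full_belief_states (partial_belief_states : List (List String)) (ordered_slots : List String) : Prop :=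
  ∀ bs ∈ partial_belief_states, 2 ≤ bs.length
instance (partial_belief_states : List (List String)) (ordered_slots : List String) : Decidable (Pre_partial_belief_states_to_ordered_full_belief_states partial_belief_states ordered_slots) := by unfold Pre_partial_belief_states_to_ordered_full_belief_states; infer_instance
def pvWitness_partial_belief_states_to_ordered_full_belief_states : List (List String) × List String :=
  ([["restaurant-food", "portugese"]], ["restaurant-area", "restaurant-food"])
def Spec_partial_belief_states_to_ordered_full_belief_states (partial_belief_states : List (List String)) (ordered_slots : List String) (out : List (List String)) : Prop := out = partial_belief_states_to_ordered_full_belief_states_alt partial_belief_states ordered_slots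
instance (partial_belief_states : List (List String)) (ordered_slots : List String) (out : List (List String)) : Decidable (Spec_partial_belief_states_to_ordered_full_belief_states partial_belief_states ordered_slots out) := by unfold Spec_partial_belief_states_to_ordered_full_belief_states; infer_instance

-- ===== CLAIM (what is proved, stated in full; the proofs are below) =====
def Claim_equal_partial_belief_states_to_ordered_full_belief_states : Prop := ∀ (partial_belief_states : List (List String)) (ordered_slots : List String), Dom_partial_belief_states_to_ordered_full_belief_states partial_belief_states ordered_slots → Pre_partial_belief_states_to_ordered_full_belief_states partial_belief_states ordered_slots → Spec_partial_belief_states_to_ordered_full_belief_states partial_belief_states ordered_slots (partial_belief_states_to_ordered_full_belief_states partial_belief_states ordered_slots)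

-- ===== LEMMAS AND PROOFS =====

-- B's staged sweeps, started from rows showing a dict d through getD, end at rows showing
-- the dict A builds from d; this is the whole correspondence between the two programs.
theorem pv_sweep_dict (pbs : List (List String)) (slots : List String)
    (d : PySem.Dict String String) :
    pbs.foldl pvSweep (slots.map (fun s => [s, d.getD s "none"]))
      = slots.map (fun s => [s, (pbs.foldl pvDictStep d).getD s "none"]) := by
  induction pbs generalizing d with
  | nil => rfl
  | cons bs rest ih =>
    match bs with
    | [] => simpa [pvSweep, pvDictStep] using ih d
    | [k] => simpa [pvSweep, pvDictStep] using ih d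
    | k :: v :: t =>
      simp only [List.foldl_cons, pvSweep, pvDictStep]
      rw [← ih (d.insert k v), List.map_map]
      have hmap : List.map (pvPatch k v ∘ fun s => [s, d.getD s "none"]) slots
          = List.map (fun s => [s, (d.insert k v).getD s "none"]) slots := by
        apply List.map_congr_left
        intro s _
        simp only [Function.comp_apply, pvPatch, PySem.Dict.getD_insert]
        by_cases h : s = k
        · simp [h]
        · simp [h, beq_iff_eq, Ne.symm h]
      rw [hmap]

-- when contains holds, getD with default "" and with default "none" agree
theorem pv_contains_getD (d : PySem.Dict String String) (slot : String)
    (h : d.contains slot = true) : [slot, d.getD slot ""] = [slot, d.getD slot "none"] := by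
  have hs : (d.get? slot).isSome = true := by
    rw [← PySem.Dict.contains_eq_isSome_get? d slot]; exact h
  rcases Option.isSome_iff_exists.mp hs with ⟨v, hv⟩
  rw [PySem.Dict.getD_of_get?_eq_some d _ hv, PySem.Dict.getD_of_get?_eq_some d _ hv]

-- ===== VERDICT (by name: the statement is the Claim_ definition above) =====
theorem partial_belief_states_to_ordered_full_belief_states_spec : Claim_equal_partial_belief_states_to_ordered_full_belief_states := by
  intro pbs slots _ _
  unfold Spec_partial_belief_states_to_ordered_full_belief_states
  unfold partial_belief_states_to_ordered_full_belief_states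
  unfold partial_belief_states_to_ordered_full_belief_states_alt
  have hinit : (slots.map (fun s => [s, "none"]))
      = slots.map (fun s => [s, (PySem.Dict.empty : PySem.Dict String String).getD s "none"]) := by
    simp [PySem.Dict.getD_empty]
  rw [hinit, pv_sweep_dict pbs slots PySem.Dict.empty]
  apply List.map_congr_left
  intro slot _
  set dA := pbs.foldl pvDictStep PySem.Dict.empty with hdA
  by_cases h : dA.contains slot = true
  · rw [if_pos h]; exact pv_contains_getD dA slot h
  · rw [if_neg h]
    rw [PySem.Dict.getD_of_not_contains dA _ (by revert h; cases dA.contains slot <;> simp)]
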